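-- pv_equiv track=rewrite | github.com/dalmuti509/Learn-Python-With-TDD | source/iteration/iteration.py | group_by_parity
-- ===== SOURCE A (Python) =====
-- def group_by_parity(numbers):
--     """
--     Group numbers by whether they are odd or even.
--
--     Args:
--         numbers (list): List of numbers to group
--
--     Returns:
--         dict: Dictionary with 'odd' and 'even' keys
--     """
--     result = {'odd': [], 'even': []}
--
--     for num in numbers:
--         if num % 2 == 0:
--             result['even'].append(num)
--         else:
--             result['odd'].append(num)
--
--     return result
-- ===== SOURCE B (Python) =====
-- def _split(nums):
--     """Divide and conquer: partition nums into (odds, evens), order preserved."""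
--     if len(nums) <= 1:
--         if not nums:
--             return [], []
--         n = nums[0]
--         if n % 2 == 0:
--             return [], [n]
--         return [n], []
--     mid = len(nums) // 2
--     lo, le = _split(nums[:mid])
--     ro, re = _split(nums[mid:])
--     return lo + ro, le + re
--
--
-- def group_by_parity(numbers):
--     """Group numbers by parity via a divide-and-conquer split."""
--     odd, even = _split(numbers)
--     return {'odd': odd, 'even': even}
-- ===== Notes on version B (the rewrite author's own statement) =====
-- stated objective: alternative
-- what changed: Replaces A's single left-to-right loop mutating a dict accumulator by a divide-and-conquer recursion that splits the list in half, partitions each half into (odds, evens) pairs, and concatenates the halves' results.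
import Mathlib
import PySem

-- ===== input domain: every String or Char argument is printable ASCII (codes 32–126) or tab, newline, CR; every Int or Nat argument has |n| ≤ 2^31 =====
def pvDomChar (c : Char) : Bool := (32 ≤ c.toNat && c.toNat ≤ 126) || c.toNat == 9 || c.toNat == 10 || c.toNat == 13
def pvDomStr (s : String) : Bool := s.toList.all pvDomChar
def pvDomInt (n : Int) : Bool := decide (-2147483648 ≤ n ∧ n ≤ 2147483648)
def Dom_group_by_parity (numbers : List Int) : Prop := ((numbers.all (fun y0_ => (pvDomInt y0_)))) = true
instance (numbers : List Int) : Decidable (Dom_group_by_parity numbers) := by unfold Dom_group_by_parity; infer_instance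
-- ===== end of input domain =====

-- B replaces A's single accumulating loop by a divide-and-conquer split into (odds, evens); same return value.
-- ===== PORT A =====
def group_by_parity (numbers : List Int) : List (String × List Int) :=
  (numbers.foldl
    (fun result num =>
      if PySem.Int.mod num 2 == 0 then
        result.modify "even" [] (fun l => l ++ [num])
      else
        result.modify "odd" [] (fun l => l ++ [num]))
    (PySem.Dict.ofList [("odd", ([] : List Int)), ("even", ([] : List Int))])).items

-- ===== PORT B =====
-- nums[:mid] / nums[mid:] with 0 ≤ mid ≤ len(nums) are exactly List.take / List.drop.
def gbp_split (nums : List Int) : List Int × List Int :=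
  if nums.length ≤ 1 then
    match nums with
    | [] => ([], [])
    | n :: _ => if PySem.Int.mod n 2 == 0 then ([], [n]) else ([n], [])
  else
    let mid := nums.length / 2
    let (lo, le) := gbp_split (nums.take mid)
    let (ro, re) := gbp_split (nums.drop mid)
    (lo ++ ro, le ++ re)
termination_by nums.length
decreasing_by
  · simp only [List.length_take]; omega
  · simp only [List.length_drop]; omega

def group_by_parity_alt (numbers : List Int) : List (String × List Int) :=
  let (odd, even) := gbp_split numbers
  [("odd", odd), ("even", even)]

-- ===== PRECONDITION & SPEC =====
def Spec_group_by_parity (numbers : List Int) (out : List (String × List Int)) : Prop := out = group_by_parity_alt numbers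
instance (numbers : List Int) (out : List (String × List Int)) : Decidable (Spec_group_by_parity numbers out) := by unfold Spec_group_by_parity; infer_instance

-- ===== CLAIM (what is proved, stated in full; the proofs are below) =====
def Claim_equal_group_by_parity : Prop := ∀ (numbers : List Int), Dom_group_by_parity numbers → Spec_group_by_parity numbers (group_by_parity numbers)

-- ===== LEMMAS AND PROOFS =====
lemma gbp_loop (numbers : List Int) (o e : List Int) :
    (numbers.foldl
      (fun result num =>
        if PySem.Int.mod num 2 == 0 then
          result.modify "even" [] (fun l => l ++ [num])
        else
          result.modify "odd" [] (fun l => l ++ [num]))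
      (PySem.Dict.mk [("odd", o), ("even", e)])).items =
    [("odd", o ++ numbers.filter (fun n => !(PySem.Int.mod n 2 == 0))),
     ("even", e ++ numbers.filter (fun n => PySem.Int.mod n 2 == 0))] := by
  induction numbers generalizing o e with
  | nil => simp
  | cons x xs ih =>
    simp only [List.foldl]
    by_cases h : (2:Int) ∣ x
    · have hmod : (PySem.Int.mod x 2 == 0) = true := by
        rw [beq_iff_eq]; exact (PySem.Int.mod_eq_zero_iff_dvd x 2).mpr h
      rw [hmod]
      have hd : (PySem.Dict.mk [("odd", o), ("even", e)]).modify "even" []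
          (fun l => l ++ [x]) = PySem.Dict.mk [("odd", o), ("even", e ++ [x])] := by
        simp [PySem.Dict.modify, PySem.Dict.getD, PySem.Dict.get?, PySem.Dict.contains,
          PySem.Dict.insert, List.find?]
      rw [if_pos rfl, hd, ih]
      simp [List.filter, Int.emod_eq_zero_of_dvd h]
    · have hmod : (PySem.Int.mod x 2 == 0) = false := by
        rw [beq_eq_false_iff_ne]
        exact fun hc => h ((PySem.Int.mod_eq_zero_iff_dvd x 2).mp hc)
      rw [hmod]
      have hd : (PySem.Dict.mk [("odd", o), ("even", e)]).modify "odd" []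
          (fun l => l ++ [x]) = PySem.Dict.mk [("odd", o ++ [x]), ("even", e)] := by
        simp [PySem.Dict.modify, PySem.Dict.getD, PySem.Dict.get?, PySem.Dict.contains,
          PySem.Dict.insert, List.find?]
      rw [if_neg (by simp), hd, ih]
      have hx : (x % 2 == 0) = false := by
        rw [beq_eq_false_iff_ne]
        exact fun hc => h (Int.dvd_of_emod_eq_zero hc)
      simp [List.filter, hx]

lemma gbp_split_eq (nums : List Int) :
    gbp_split nums =
      (nums.filter (fun n => !(PySem.Int.mod n 2 == 0)),
       nums.filter (fun n => PySem.Int.mod n 2 == 0)) := by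
  fun_induction gbp_split nums with
  | case1 h => simp
  | case2 a b c h =>
    obtain rfl : b = [] := by cases b with | nil => rfl | cons x t => simp at h
    have hc : (a % 2 == 0) = true := by
      rw [beq_iff_eq]
      exact Int.emod_eq_zero_of_dvd ((PySem.Int.mod_eq_zero_iff_dvd a 2).mp (beq_iff_eq.mp c))
    simp [hc]
  | case3 a b c h =>
    obtain rfl : b = [] := by cases b with | nil => rfl | cons x t => simp at h
    have hc : (a % 2 == 0) = false := by
      rw [beq_eq_false_iff_ne]
      intro hc
      exact c (by rw [beq_iff_eq]; exact (PySem.Int.mod_eq_zero_iff_dvd a 2).mpr (Int.dvd_of_emod_eq_zero hc))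
    simp [hc]
  | case4 x hx mid lo le h1 ro re h2 ih1 ih2 =>
    rw [h1] at ih1
    rw [h2] at ih2
    obtain ⟨rfl, rfl⟩ := Prod.mk.injEq .. ▸ ih1
    obtain ⟨rfl, rfl⟩ := Prod.mk.injEq .. ▸ ih2
    rw [← List.filter_append, ← List.filter_append, List.take_append_drop]

-- ===== VERDICT (by name: the statement is the Claim_ definition above) =====
theorem group_by_parity_spec : Claim_equal_group_by_parity := by
  intro numbers _
  unfold Spec_group_by_parity group_by_parity group_by_parity_alt
  have h : PySem.Dict.ofList [("odd", ([] : List Int)), ("even", ([] : List Int))] =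
      PySem.Dict.mk [("odd", ([] : List Int)), ("even", ([] : List Int))] := by decide
  rw [h, gbp_split_eq]
  simpa using gbp_loop numbers [] []
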